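-- pv_equiv track=rewrite | github.com/qqzmr/pynumbertheory | sqrtrange.py | get_sqrt_range
-- ===== SOURCE A (Python) =====
-- def get_sqrt_range(num):
--     """
--         求平方根范围。
--
--         Args:
--             num: 大于等于0并且是整数。
--
--         Returns:
--             返回元组，表示一个范围。平方根一定在这个范围之内。
--
--         Raises:
--             IOError: 无错误。
--     """
--     if num == 0:
--         return 0, 0
--     if num == 1:
--         return 1, 1
--     if num == 2 or num == 3:
--         return 1, 2
--     if num == 4:
--         return 2, 2
--     if num == 5 or num == 6 or num == 7 or num == 8:
--         return 2, 3
--     a = 1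
--     b = num - 1
--     while 1:
--         c = (a + b) // 2
--         if c ** 2 > num:
--             b = c
--             if a ** 2 == num:
--                 return a, a
--             if a + 1 == b:
--                 return a, b
--         elif c ** 2 < num:
--             a = c
--             if b ** 2 == num:
--                 return b, b
--             if a + 1 == b:
--                 return a, b
--         else:
--             return c, c
-- ===== SOURCE B (Python) =====
-- def get_sqrt_range(num):
--     """Return (r, r) if num is a perfect square else (r, r+1), r = isqrt(num).
--
--     Computed by Newton's iteration instead of bisection."""
--     if num == 0:
--         return 0, 0
--     x = num
--     while True:
--         nx = (x + num // x) // 2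
--         if nx >= x:
--             break
--         x = nx
--     if x * x == num:
--         return x, x
--     return x, x + 1
-- ===== Notes on version B (the rewrite author's own statement) =====
-- stated objective: alternative
-- what changed: Replaced A's hard-coded small cases plus binary bisection on [1, num-1] with Newton's integer-square-root iteration x <- (x + num//x)//2 starting from x=num.
import Mathlib
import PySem

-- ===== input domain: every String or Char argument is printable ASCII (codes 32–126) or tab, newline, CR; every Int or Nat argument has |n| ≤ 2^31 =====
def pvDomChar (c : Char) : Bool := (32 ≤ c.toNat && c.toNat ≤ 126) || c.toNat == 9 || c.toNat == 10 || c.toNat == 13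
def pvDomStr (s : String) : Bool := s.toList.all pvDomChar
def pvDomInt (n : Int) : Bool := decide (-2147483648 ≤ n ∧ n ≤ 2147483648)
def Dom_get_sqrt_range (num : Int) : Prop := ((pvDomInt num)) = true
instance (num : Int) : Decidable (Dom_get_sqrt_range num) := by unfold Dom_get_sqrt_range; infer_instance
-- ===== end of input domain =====

-- B replaces A's hand-rolled binary bisection (with hard-coded small cases) by Newton's
-- integer-square-root iteration; objective: alternative algorithm of similar cost.


-- ===== PORT A =====
-- 'while 1' bisection loop of A; the '0 < b - a' guard only makes the recursion total
-- (on every execution A reaches, a < b holds; see bisectA_correct below).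
def bisectA (num a b : Int) : Int × Int :=
  if hab : 0 < b - a then
    let c := PySem.Int.floordiv (a + b) 2
    if c ^ 2 > num then
      if a ^ 2 = num then (a, a)
      else if a + 1 = c then (a, c)
      else bisectA num a c
    else if c ^ 2 < num then
      if b ^ 2 = num then (b, b)
      else if c + 1 = b then (c, b)
      else bisectA num c b
    else (c, c)
  else (0, 0)
termination_by (b - a).toNat
decreasing_by
  · have hcb : PySem.Int.floordiv (a + b) 2 < b := by
      rw [PySem.Int.floordiv_lt_iff_lt_mul (by omega : (0:Int) < 2)]; omega
    omega
  · have hca : a < PySem.Int.floordiv (a + b) 2 := by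
      by_cases hb1 : b = a + 1
      · exfalso
        have : PySem.Int.floordiv (a + b) 2 = a := by
          rw [PySem.Int.floordiv_eq_iff_of_pos (by omega : (0:Int) < 2)]; omega
        omega
      · have := (PySem.Int.le_floordiv_iff_mul_le (a := a + b) (b := 2) (q := a + 1)
          (by omega)).mpr (by omega)
        omega
    omega

def get_sqrt_range (num : Int) : Int × Int :=
  if num = 0 then (0, 0)
  else if num = 1 then (1, 1)
  else if num = 2 ∨ num = 3 then (1, 2)
  else if num = 4 then (2, 2)
  else if num = 5 ∨ num = 6 ∨ num = 7 ∨ num = 8 then (2, 3)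
  else bisectA num 1 (num - 1)

-- ===== PORT B =====
-- Newton iteration of Source B: repeat x ← (x + num // x) // 2 while it decreases.
-- The '0 < x' guard only makes the recursion total (it always holds on B's executions).
def newtonB (num x : Int) : Int :=
  let nx := PySem.Int.floordiv (x + PySem.Int.floordiv num x) 2
  if h : nx < x ∧ 0 < x then newtonB num nx else x
termination_by x.toNat
decreasing_by omega

def get_sqrt_range_alt (num : Int) : Int × Int :=
  if num = 0 then (0, 0)
  else
    let x := newtonB num num
    if x * x = num then (x, x) else (x, x + 1)

-- ===== PRECONDITION & SPEC =====
-- A's docstring requires num ≥ 0; on negative num A's bisection loop never terminates.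
def Pre_get_sqrt_range (num : Int) : Prop := 0 ≤ num
instance (num : Int) : Decidable (Pre_get_sqrt_range num) := by unfold Pre_get_sqrt_range; infer_instance
def pvWitness_get_sqrt_range : Int := 10

def Spec_get_sqrt_range (num : Int) (out : Int × Int) : Prop := out = get_sqrt_range_alt num
instance (num : Int) (out : Int × Int) : Decidable (Spec_get_sqrt_range num out) := by unfold Spec_get_sqrt_range; infer_instance

-- ===== CLAIM (what is proved, stated in full; the proofs are below) =====
def Claim_equal_get_sqrt_range : Prop := ∀ (num : Int), Dom_get_sqrt_range num → Pre_get_sqrt_range num → Spec_get_sqrt_range num (get_sqrt_range num)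

-- ===== LEMMAS AND PROOFS =====

-- the common value of both programs: (r, r) for perfect squares, else (r, r+1)
def sqrtPair (num : Int) : Int × Int :=
  let s := Int.sqrt num
  if s * s = num then (s, s) else (s, s + 1)

theorem sqrt_lb (n : Int) (h : 0 ≤ n) : Int.sqrt n * Int.sqrt n ≤ n := by
  have h1 := Nat.sqrt_le' n.toNat
  rw [Nat.pow_two] at h1
  have h2 : ((Nat.sqrt n.toNat : Int)) * (Nat.sqrt n.toNat : Int) ≤ (n.toNat : Int) := by
    exact_mod_cast h1
  simpa [Int.sqrt, Int.toNat_of_nonneg h] using h2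
theorem sqrt_ub (n : Int) : n < (Int.sqrt n + 1) * (Int.sqrt n + 1) := by
  rcases le_or_gt 0 n with h | h
  · have h1 := Nat.lt_succ_sqrt' n.toNat
    rw [Nat.succ_eq_add_one, Nat.pow_two] at h1
    have h2 : (n.toNat : Int) < ((Nat.sqrt n.toNat : Int) + 1) * ((Nat.sqrt n.toNat : Int) + 1) := by
      exact_mod_cast h1
    simpa [Int.sqrt, Int.toNat_of_nonneg h] using h2
  · have := Int.sqrt_nonneg n; nlinarith
theorem sqrt_eq_of (n r : Int) (h0 : 0 ≤ r) (h1 : r * r ≤ n) (h2 : n < (r + 1) * (r + 1)) :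
    Int.sqrt n = r := by
  have hs0 := Int.sqrt_nonneg n
  have hl := sqrt_lb n (le_trans (mul_self_nonneg r) h1)
  have hu := sqrt_ub n
  by_contra hne
  rcases lt_or_gt_of_ne hne with hlt | hgt
  · nlinarith
  · nlinarith
theorem sqrt_pos (n : Int) (h : 1 ≤ n) : 1 ≤ Int.sqrt n := by
  have hs0 := Int.sqrt_nonneg n
  by_contra hc
  have h0 : Int.sqrt n = 0 := by omega
  have hu := sqrt_ub n
  rw [h0] at hu
  omega

theorem floordiv_bracket (num x : Int) (hx : 0 < x) :
    PySem.Int.floordiv num x * x ≤ num ∧ num < (PySem.Int.floordiv num x + 1) * x :=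
  ⟨(PySem.Int.le_floordiv_iff_mul_le hx).mp le_rfl,
   (PySem.Int.floordiv_lt_iff_lt_mul hx).mp (lt_add_one _)⟩
theorem newton_amgm (num x : Int) (hn : 1 ≤ num) (hx : 0 < x) :
    Int.sqrt num ≤ PySem.Int.floordiv (x + PySem.Int.floordiv num x) 2 := by
  set q := PySem.Int.floordiv num x with hq
  obtain ⟨hq1, hq2⟩ := floordiv_bracket num x hx
  have hs1 := sqrt_lb num (by omega)
  have hs0 := Int.sqrt_nonneg num
  have hq0 : 0 ≤ q := (PySem.Int.le_floordiv_iff_mul_le hx).mpr (by omega)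
  rw [PySem.Int.le_floordiv_iff_mul_le (by omega : (0:Int) < 2)]
  by_contra hcon
  push_neg at hcon
  have h2s : (x + q + 1) * (x + q + 1) ≤ (2 * Int.sqrt num) * (2 * Int.sqrt num) := by
    have : x + q + 1 ≤ 2 * Int.sqrt num := by omega
    nlinarith
  nlinarith [sq_nonneg (x - q - 1)]
theorem newton_descent (num x : Int) (hn : 1 ≤ num) (hx : Int.sqrt num < x) :
    PySem.Int.floordiv (x + PySem.Int.floordiv num x) 2 < x := by
  have hs0 := Int.sqrt_nonneg num
  have hxpos : 0 < x := by omega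
  obtain ⟨hq1, hq2⟩ := floordiv_bracket num x hxpos
  have hu := sqrt_ub num
  have hqx : PySem.Int.floordiv num x < x := by nlinarith
  rw [PySem.Int.floordiv_lt_iff_lt_mul (by omega : (0:Int) < 2)]
  omega
theorem newtonB_correct (num : Int) (hn : 1 ≤ num) :
    ∀ x : Int, Int.sqrt num ≤ x → newtonB num x = Int.sqrt num := by
  suffices H : ∀ k : Nat, ∀ x : Int, x.toNat = k → Int.sqrt num ≤ x → newtonB num x = Int.sqrt num by
    exact fun x hx => H x.toNat x rfl hx
  intro k
  induction k using Nat.strong_induction_on with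
  | _ k ih =>
    intro x hk hx
    have hs1 := sqrt_pos num hn
    have hxpos : 0 < x := by omega
    rw [newtonB]
    set nx := PySem.Int.floordiv (x + PySem.Int.floordiv num x) 2 with hnx
    have hge := newton_amgm num x hn hxpos
    by_cases hcase : nx < x ∧ 0 < x
    · rw [dif_pos hcase]
      exact ih nx.toNat (by omega) nx rfl hge
    · rw [dif_neg hcase]
      rcases eq_or_lt_of_le hx with he | hlt
      · omega
      · exact absurd ⟨hnx ▸ newton_descent num x hn hlt, hxpos⟩ hcase

theorem sqrtPair_of_between (num s : Int) (h0 : 0 ≤ s) (h1 : s * s < num)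
    (h2 : num < (s + 1) * (s + 1)) : sqrtPair num = (s, s + 1) := by
  have hs : Int.sqrt num = s := sqrt_eq_of num s h0 (le_of_lt h1) h2
  unfold sqrtPair
  rw [hs, if_neg (by omega)]
theorem bisectA_correct : ∀ (num a b : Int), 1 ≤ a → a * a < num → num < b * b → a < b →
    bisectA num a b = sqrtPair num := by
  suffices H : ∀ k : Nat, ∀ num a b : Int, (b - a).toNat = k → 1 ≤ a → a * a < num →
      num < b * b → a < b → bisectA num a b = sqrtPair num by
    exact fun num a b h1 h2 h3 h4 => H (b - a).toNat num a b rfl h1 h2 h3 h4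
  intro k
  induction k using Nat.strong_induction_on with
  | _ k ih =>
    intro num a b hk ha1 ha2 hb2 hab
    have hnum : 0 < num := by nlinarith
    rw [bisectA, dif_pos (by omega : 0 < b - a)]
    set c := PySem.Int.floordiv (a + b) 2 with hc
    have hac : a ≤ c := by
      have := (PySem.Int.le_floordiv_iff_mul_le (a := a + b) (b := 2) (q := a) (by omega)).mpr (by omega)
      omega
    have hcb : c < b := by
      rw [hc, PySem.Int.floordiv_lt_iff_lt_mul (by omega : (0:Int) < 2)]; omega
    have hsq : ∀ t : Int, t ^ 2 = t * t := fun t => pow_two t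
    by_cases h1 : c ^ 2 > num
    · rw [if_pos h1, if_neg (by rw [hsq]; omega : ¬ a ^ 2 = num)]
      rw [hsq] at h1
      -- num < c*c now; a ≤ sqrt < c
      have hscl : a ≤ Int.sqrt num := by
        have hu := sqrt_ub num
        have hl := sqrt_lb num (by omega)
        have hs0 := Int.sqrt_nonneg num
        by_contra hcon
        push_neg at hcon
        nlinarith
      have hscu : Int.sqrt num < c := by
        have hl := sqrt_lb num (by omega)
        have hs0 := Int.sqrt_nonneg num
        by_contra hcon
        push_neg at hcon
        nlinarith
      by_cases h3 : a + 1 = c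
      · rw [if_pos h3]
        have hs : Int.sqrt num = a := by omega
        rw [sqrtPair_of_between num a (by omega) ha2 (by rw [h3]; exact h1)]
        rw [← h3]
      · rw [if_neg h3]
        have hacs : a < c := by
          rcases eq_or_lt_of_le hac with he | h
          · exfalso; rw [← he] at h1; omega
          · exact h
        exact ih (c - a).toNat (by omega) num a c rfl ha1 ha2 h1 hacs
    · rw [if_neg h1]
      rw [hsq] at h1
      by_cases h2 : c ^ 2 < num
      · rw [if_pos h2, if_neg (by rw [hsq]; omega : ¬ b ^ 2 = num)]
        rw [hsq] at h2
        have hscl : c ≤ Int.sqrt num := by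
          have hu := sqrt_ub num
          have hs0 := Int.sqrt_nonneg num
          by_contra hcon
          push_neg at hcon
          nlinarith
        have hscu : Int.sqrt num < b := by
          have hl := sqrt_lb num (by omega)
          have hs0 := Int.sqrt_nonneg num
          by_contra hcon
          push_neg at hcon
          nlinarith
        by_cases h3 : c + 1 = b
        · rw [if_pos h3]
          have hs : Int.sqrt num = c := by omega
          rw [sqrtPair_of_between num c (by omega) h2 (by rw [h3]; exact hb2)]
          rw [← h3]
        · rw [if_neg h3]
          have hacs : a < c := by
            by_cases hb1 : b = a + 1
            · exfalso
              have : c = a := by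
                rw [hc, PySem.Int.floordiv_eq_iff_of_pos (by omega : (0:Int) < 2)]; omega
              omega
            · have := (PySem.Int.le_floordiv_iff_mul_le (a := a + b) (b := 2) (q := a + 1)
                (by omega)).mpr (by omega)
              omega
          exact ih (b - c).toNat (by omega) num c b rfl (by omega) h2 hb2 (by omega)
      · rw [if_neg h2]
        have hceq : c * c = num := by rw [hsq] at h2; omega
        have hs : Int.sqrt num = c :=
          sqrt_eq_of num c (by omega) (le_of_eq hceq) (by nlinarith)
        unfold sqrtPair
        rw [hs, if_pos hceq]

theorem sqrtPair_eval (n s : Int) (h0 : 0 ≤ s) (h1 : s * s ≤ n) (h2 : n < (s + 1) * (s + 1)) :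
    sqrtPair n = if s * s = n then (s, s) else (s, s + 1) := by
  unfold sqrtPair
  rw [sqrt_eq_of n s h0 h1 h2]

theorem A_eq (num : Int) (h : 0 ≤ num) : get_sqrt_range num = sqrtPair num := by
  by_cases h9 : num ≤ 8
  · interval_cases num
    · rw [sqrtPair_eval 0 0 (by omega) (by omega) (by omega)]; decide
    · rw [sqrtPair_eval 1 1 (by omega) (by omega) (by omega)]; decide
    · rw [sqrtPair_eval 2 1 (by omega) (by omega) (by omega)]; decide
    · rw [sqrtPair_eval 3 1 (by omega) (by omega) (by omega)]; decide
    · rw [sqrtPair_eval 4 2 (by omega) (by omega) (by omega)]; decide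
    · rw [sqrtPair_eval 5 2 (by omega) (by omega) (by omega)]; decide
    · rw [sqrtPair_eval 6 2 (by omega) (by omega) (by omega)]; decide
    · rw [sqrtPair_eval 7 2 (by omega) (by omega) (by omega)]; decide
    · rw [sqrtPair_eval 8 2 (by omega) (by omega) (by omega)]; decide
  · unfold get_sqrt_range
    rw [if_neg (by omega), if_neg (by omega), if_neg (by omega), if_neg (by omega),
      if_neg (by omega)]
    exact bisectA_correct num 1 (num - 1) le_rfl (by omega) (by nlinarith) (by omega)

theorem B_eq (num : Int) (h : 0 ≤ num) : get_sqrt_range_alt num = sqrtPair num := by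
  by_cases h0 : num = 0
  · subst h0; decide
  · have h1 : 1 ≤ num := by omega
    have hsle : Int.sqrt num ≤ num := by
      have := sqrt_pos num h1
      have := sqrt_lb num (by omega)
      nlinarith
    have hs := newtonB_correct num h1 num hsle
    unfold get_sqrt_range_alt
    rw [if_neg h0]
    simp only [hs, sqrtPair]

-- ===== VERDICT (by name: the statement is the Claim_ definition above) =====
theorem get_sqrt_range_spec : Claim_equal_get_sqrt_range := by
  intro num _ hpre
  unfold Spec_get_sqrt_range
  rw [A_eq num hpre, B_eq num hpre]
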